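-- pv_equiv track=rewrite | github.com/marshshaun/LEDShow | LEDShow/utils.py | stripToGrid
-- ===== SOURCE A (Python) =====
-- def stripToGrid(pixelCount, columnCount):
--     """
--     Converts neopixel linear strip positions to row/column grid coordinates (bottom left origin)
--
--     Attributes:
--         pixelCount:  Number of pixels
--         columnCount: Number of columns
--
--     Return: A 2 dimensional array with linear positions mapped to grid
--
--     """
--     rowCount = int(pixelCount/columnCount)
--     grid = [[0 for x in range(rowCount)] for y in range(columnCount)]
--
--     pixel = 0
--     for y in range(rowCount):
--         for x in range(columnCount):
--             column = x if y%2 == 0 else columnCount-1-x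
--             grid[column][y] = pixel
--             pixel += 1
--
--     return grid
-- ===== SOURCE B (Python) =====
-- def stripToGrid(pixelCount, columnCount):
--     """Closed-form serpentine mapping: each cell is computed from its (column, y) coordinates."""
--     rowCount = int(pixelCount/columnCount)
--     return [[y*columnCount + (column if y % 2 == 0 else columnCount-1-column)
--              for y in range(rowCount)]
--             for column in range(columnCount)]
-- ===== Notes on version B (the rewrite author's own statement) =====
-- stated objective: simpler
-- what changed: Replaced A's mutable grid with a running pixel counter and serpentine sequential writes by a nested comprehension that computes each cell directly from its coordinates via the closed form y*columnCount + (column if y%2==0 else columnCount-1-column).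
import Mathlib
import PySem

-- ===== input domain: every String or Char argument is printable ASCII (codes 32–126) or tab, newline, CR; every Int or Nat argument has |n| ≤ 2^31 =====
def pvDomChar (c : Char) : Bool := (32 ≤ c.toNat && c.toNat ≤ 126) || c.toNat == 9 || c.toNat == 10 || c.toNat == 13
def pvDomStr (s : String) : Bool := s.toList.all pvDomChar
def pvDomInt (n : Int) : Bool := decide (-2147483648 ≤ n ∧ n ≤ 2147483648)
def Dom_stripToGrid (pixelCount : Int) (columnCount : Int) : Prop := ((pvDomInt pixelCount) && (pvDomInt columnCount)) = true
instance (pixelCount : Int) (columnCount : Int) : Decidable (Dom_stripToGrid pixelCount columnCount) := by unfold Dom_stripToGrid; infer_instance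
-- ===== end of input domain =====

-- B replaces A's running pixel counter and sequential serpentine writes by a nested
-- comprehension computing each cell in closed form from its (column, y) coordinates (objective: simpler).


-- ===== PORT A =====
-- grid[column][y] = pixel; pixel += 1   (column, y are in range whenever the write executes)
def pvInnerStep (columnCount y : Int) (st : List (List Int) × Int) (x : Int) : List (List Int) × Int :=
  let column := if PySem.Int.mod y 2 = 0 then x else columnCount - 1 - x
  (st.1.modify column.toNat (fun row => row.set y.toNat st.2), st.2 + 1)

-- for x in range(columnCount): …
def pvOuterStep (columnCount : Int) (st : List (List Int) × Int) (y : Int) : List (List Int) × Int :=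
  (PySem.List.pyRange 0 columnCount 1).foldl (pvInnerStep columnCount y) st

-- int(pixelCount/columnCount) is exact truncating division on Dom (|args| ≤ 2^31 < 2^53): PySem.Int.truncdiv
def stripToGrid (pixelCount : Int) (columnCount : Int) : List (List Int) :=
  let rowCount := PySem.Int.truncdiv pixelCount columnCount
  let grid : List (List Int) :=
    (PySem.List.pyRange 0 columnCount 1).map (fun _ =>
      (PySem.List.pyRange 0 rowCount 1).map (fun _ => (0 : Int)))
  ((PySem.List.pyRange 0 rowCount 1).foldl (pvOuterStep columnCount) (grid, 0)).1

-- ===== PORT B =====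
def stripToGrid_alt (pixelCount : Int) (columnCount : Int) : List (List Int) :=
  let rowCount := PySem.Int.truncdiv pixelCount columnCount
  (PySem.List.pyRange 0 columnCount 1).map (fun column =>
    (PySem.List.pyRange 0 rowCount 1).map (fun y =>
      y * columnCount + (if PySem.Int.mod y 2 = 0 then column else columnCount - 1 - column)))

-- ===== PRECONDITION & SPEC =====
-- Python raises ZeroDivisionError on columnCount == 0 (both A and B); nothing else raises.
def Pre_stripToGrid (pixelCount : Int) (columnCount : Int) : Prop := columnCount ≠ 0
instance (pixelCount : Int) (columnCount : Int) : Decidable (Pre_stripToGrid pixelCount columnCount) := by unfold Pre_stripToGrid; infer_instance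
def pvWitness_stripToGrid : Int × Int := (12, 3)

def Spec_stripToGrid (pixelCount : Int) (columnCount : Int) (out : List (List Int)) : Prop := out = stripToGrid_alt pixelCount columnCount
instance (pixelCount : Int) (columnCount : Int) (out : List (List Int)) : Decidable (Spec_stripToGrid pixelCount columnCount out) := by unfold Spec_stripToGrid; infer_instance

-- ===== CLAIM (what is proved, stated in full; the proofs are below) =====
def Claim_equal_stripToGrid : Prop := ∀ (pixelCount : Int) (columnCount : Int), Dom_stripToGrid pixelCount columnCount → Pre_stripToGrid pixelCount columnCount → Spec_stripToGrid pixelCount columnCount (stripToGrid pixelCount columnCount)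

-- ===== LEMMAS AND PROOFS =====

-- closed-form cell value, Nat coordinates
def pvF (c : Int) (c' y : Nat) : Int :=
  (y : Int) * c + (if y % 2 = 0 then (c' : Int) else c - 1 - (c' : Int))

-- grid after rows [0, k) are fully written
def pvGridK (c : Int) (n r k : Nat) : List (List Int) :=
  (List.range n).map (fun c' => (List.range r).map (fun y => if y < k then pvF c c' y else 0))

-- grid mid-row y, after x inner iterations (even/odd rows write left-to-right/right-to-left)
abbrev pvWrit (n x c' y : Nat) : Prop := (y % 2 = 0 ∧ c' < x) ∨ (y % 2 ≠ 0 ∧ n - x ≤ c')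

def pvGridM (c : Int) (n r y x : Nat) : List (List Int) :=
  (List.range n).map (fun c' => (List.range r).map (fun y' =>
    if y' < y ∨ (y' = y ∧ pvWrit n x c' y) then pvF c c' y' else 0))

theorem pvFoldl_fixed {α β : Type} (init : α) (l : List β) :
    List.foldl (fun st (_ : β) => st) init l = init := by
  induction l generalizing init with
  | nil => rfl
  | cons b l ih => simpa using ih init

theorem pvMod_two (y : Nat) : PySem.Int.mod (y : Int) 2 = ((y % 2 : Nat) : Int) := by
  exact_mod_cast PySem.Int.mod_natCast y 2

theorem pvGridM_zero (c : Int) (n r y : Nat) : pvGridM c n r y 0 = pvGridK c n r y := by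
  unfold pvGridM pvGridK
  refine List.map_congr_left (fun c' hc' => ?_)
  refine List.map_congr_left (fun y' hy' => ?_)
  have : ¬ (y' = y ∧ pvWrit n 0 c' y) := by
    rintro ⟨rfl, hw⟩
    simp only [List.mem_range] at hc'
    unfold pvWrit at hw
    omega
  by_cases h : y' < y <;> simp [h, this]

theorem pvGridM_full (c : Int) (n r y : Nat) : pvGridM c n r y n = pvGridK c n r (y + 1) := by
  unfold pvGridM pvGridK
  refine List.map_congr_left (fun c' hc' => ?_)
  refine List.map_congr_left (fun y' hy' => ?_)
  simp only [List.mem_range] at hc'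
  have hw : pvWrit n n c' y := by unfold pvWrit; omega
  have : (y' < y ∨ (y' = y ∧ pvWrit n n c' y)) ↔ y' < y + 1 := by
    constructor
    · rintro (h | ⟨rfl, _⟩) <;> omega
    · intro h; rcases Nat.lt_succ_iff_lt_or_eq.mp h with h | rfl
      · exact Or.inl h
      · exact Or.inr ⟨rfl, hw⟩
  rw [if_congr this rfl rfl]

-- one inner write turns pvGridM x into pvGridM (x+1)
theorem pvInner_write (c : Int) (n r y x : Nat) (hn : c = (n : Int)) (hx : x < n) (hy : y < r) :
    pvInnerStep c (y : Int) (pvGridM c n r y x, (y : Int) * c + (x : Int)) (x : Int)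
      = (pvGridM c n r y (x + 1), (y : Int) * c + (x : Int) + 1) := by
  unfold pvInnerStep
  simp only [pvMod_two]
  have hcond : ((((y % 2 : Nat) : Int)) = 0) ↔ y % 2 = 0 := by omega
  refine Prod.ext ?_ rfl
  simp only
  -- the written column index
  set col : Nat := if y % 2 = 0 then x else n - 1 - x with hcol
  have hcoltoNat : (if (((y % 2 : Nat) : Int)) = 0 then (x : Int) else c - 1 - (x : Int)).toNat = col := by
    rw [hcol, hn]; by_cases h : y % 2 = 0 <;> simp [h, hcond] <;> omega
  rw [hcoltoNat]
  have hcollt : col < n := by rw [hcol]; split <;> omega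
  -- elementwise
  unfold pvGridM
  apply List.ext_getElem
  · simp [List.length_modify]
  intro c' h1 h2
  simp only [List.length_modify, List.length_map, List.length_range] at h1
  rw [List.getElem_modify]
  simp only [List.getElem_map, List.getElem_range]
  by_cases hc : col = c'
  · subst hc
    simp only [if_true]
    apply List.ext_getElem
    · simp
    intro y' g1 g2
    simp only [List.length_set, List.length_map, List.length_range] at g1
    rw [List.getElem_set]
    simp only [Int.toNat_natCast, List.getElem_map, List.getElem_range]
    by_cases hyy : y = y'
    · subst hyy
      rw [if_pos rfl]
      have hnew : pvWrit n (x + 1) col y := by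
        unfold pvWrit; rw [hcol]; by_cases h : y % 2 = 0 <;> simp [h] <;> omega
      have hval : pvF c col y = (y : Int) * c + (x : Int) := by
        unfold pvF
        rw [hcol]
        by_cases h : y % 2 = 0
        · simp [h]
        · simp only [h, if_neg, if_false]
          rw [hn]
          congr 1
          omega
      rw [if_pos (Or.inr ⟨rfl, hnew⟩), hval]
    · rw [if_neg hyy]
      have hyy' : y' ≠ y := fun h => hyy h.symm
      have hcong : (y' < y ∨ (y' = y ∧ pvWrit n (x + 1) col y)) ↔ (y' < y ∨ (y' = y ∧ pvWrit n x col y)) := by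
        simp [hyy']
      rw [if_congr hcong rfl rfl]
  · simp only [if_neg hc]
    refine List.map_congr_left (fun y' hy' => ?_)
    have : (y' < y ∨ (y' = y ∧ pvWrit n (x + 1) c' y)) ↔ (y' < y ∨ (y' = y ∧ pvWrit n x c' y)) := by
      have : pvWrit n (x + 1) c' y ↔ pvWrit n x c' y := by
        unfold pvWrit; rw [hcol] at hc; split at hc <;> rename_i hpar <;> simp [hpar] <;> omega
      tauto
    rw [if_congr this rfl rfl]

-- the inner loop over range(columnCount) writes row y completely
theorem pvInner_loop (c : Int) (n r y : Nat) (hn : c = (n : Int)) (hy : y < r) :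
    ∀ x ≤ n, List.foldl (pvInnerStep c (y : Int)) (pvGridK c n r y, (y : Int) * c)
        ((List.range x).map (fun k : Nat => (k : Int)))
      = (pvGridM c n r y x, (y : Int) * c + (x : Int)) := by
  intro x
  induction x with
  | zero => intro _; simp [pvGridM_zero]
  | succ x ih =>
    intro hxn
    rw [List.range_succ, List.map_append, List.foldl_append, ih (by omega)]
    simp only [List.map_cons, List.map_nil, List.foldl_cons, List.foldl_nil]
    rw [pvInner_write c n r y x hn (by omega) hy]
    simp only [Prod.mk.injEq]
    exact ⟨trivial, by push_cast; ring⟩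

-- the outer loop over range(rowCount)
theorem pvOuter_loop (c : Int) (n r : Nat) (hn : c = (n : Int)) :
    ∀ k ≤ r, List.foldl (pvOuterStep c) (pvGridK c n r 0, 0)
        ((List.range k).map (fun j : Nat => (j : Int)))
      = (pvGridK c n r k, (k : Int) * c) := by
  intro k
  induction k with
  | zero => intro _; simp
  | succ k ih =>
    intro hkr
    rw [List.range_succ, List.map_append, List.foldl_append, ih (by omega)]
    simp only [List.map_cons, List.map_nil, List.foldl_cons, List.foldl_nil]
    unfold pvOuterStep
    have hrange : PySem.List.pyRange 0 c 1 = (List.range n).map (fun j : Nat => (j : Int)) := by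
      rw [PySem.List.pyRange_one]; simp [hn]
    rw [hrange, pvInner_loop c n r k hn (by omega) n (le_refl n), pvGridM_full, hn]
    simp only [Prod.mk.injEq]
    exact ⟨trivial, by push_cast; ring⟩

theorem pvRange_nonneg (m : Int) : PySem.List.pyRange 0 m 1 = (List.range m.toNat).map (fun j : Nat => (j : Int)) := by
  rw [PySem.List.pyRange_one]; simp

theorem stripToGrid_eq_alt (pixelCount columnCount : Int) :
    stripToGrid pixelCount columnCount = stripToGrid_alt pixelCount columnCount := by
  simp only [stripToGrid, stripToGrid_alt]
  set rw := PySem.Int.truncdiv pixelCount columnCount with hrw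
  by_cases hc : columnCount ≤ 0
  · -- range(columnCount) is empty: the grid is [] and every inner loop is empty
    have h0 : PySem.List.pyRange 0 columnCount 1 = [] := PySem.List.pyRange_one_eq_nil (by omega)
    rw [h0]
    simp only [List.map_nil]
    have : ∀ st : List (List Int) × Int, ∀ l : List Int,
        List.foldl (pvOuterStep columnCount) st l = st := by
      intro st l
      have : pvOuterStep columnCount = fun st _ => st := by
        funext st y; unfold pvOuterStep; rw [h0]; rfl
      rw [this, pvFoldl_fixed]
    rw [this]
  · push_neg at hc
    set n : Nat := columnCount.toNat with hnn
    have hn : columnCount = (n : Int) := by omega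
    set r : Nat := rw.toNat with hrn
    -- initial grid = pvGridK … 0
    have hinit : (PySem.List.pyRange 0 columnCount 1).map (fun _ =>
        (PySem.List.pyRange 0 rw 1).map (fun _ => (0 : Int))) = pvGridK columnCount n r 0 := by
      rw [pvRange_nonneg columnCount, pvRange_nonneg rw]
      unfold pvGridK
      simp [List.map_map, Function.comp_def]
      exact ⟨rfl, Or.inr rfl⟩
    rw [hinit, pvRange_nonneg rw, ← hrn]
    rw [pvOuter_loop columnCount n r hn r (le_refl r)]
    unfold pvGridK
    rw [pvRange_nonneg columnCount, ← hnn]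
    simp only [List.map_map, Function.comp_def]
    refine List.map_congr_left (fun c' _ => ?_)
    refine List.map_congr_left (fun y hy => ?_)
    simp only [List.mem_range] at hy
    rw [if_pos hy]
    unfold pvF
    simp only [pvMod_two]
    by_cases hpar : y % 2 = 0
    · rw [if_pos hpar, if_pos (by omega : (((y % 2 : Nat) : Int)) = 0)]
    · rw [if_neg hpar, if_neg (by omega : ¬ (((y % 2 : Nat) : Int)) = 0)]

-- ===== VERDICT (by name: the statement is the Claim_ definition above) =====
theorem stripToGrid_spec : Claim_equal_stripToGrid := by
  intro p c _ _
  unfold Spec_stripToGrid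
  exact stripToGrid_eq_alt p c
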